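-- pv_equiv track=rewrite | github.com/didogrigorov/EdabitExercisesPython | Count Letters in a Word Search.py | letter_counter
-- ===== SOURCE A (Python) =====
-- def letter_counter(matrix, searched_letter):
--   all_letters = {}
--
--   for row in matrix:
--     for letter in row:
--       if letter not in all_letters:
--         all_letters[letter] = 0
--
--       all_letters[letter] += 1
--
--   if searched_letter in all_letters:
--     return all_letters[searched_letter]
-- ===== SOURCE B (Python) =====
-- def letter_counter(matrix, searched_letter):
--     total = sum(row.count(searched_letter) for row in matrix)
--     return total if total else None
-- ===== Notes on version B (the rewrite author's own statement) =====
-- stated objective: faster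
-- what changed: B drops the frequency dictionary entirely: it sums row.count(searched_letter) over the rows (counting only the target, in C-level list.count) and maps a zero total to None, instead of building a histogram of every letter and looking the target up.
import Mathlib
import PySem

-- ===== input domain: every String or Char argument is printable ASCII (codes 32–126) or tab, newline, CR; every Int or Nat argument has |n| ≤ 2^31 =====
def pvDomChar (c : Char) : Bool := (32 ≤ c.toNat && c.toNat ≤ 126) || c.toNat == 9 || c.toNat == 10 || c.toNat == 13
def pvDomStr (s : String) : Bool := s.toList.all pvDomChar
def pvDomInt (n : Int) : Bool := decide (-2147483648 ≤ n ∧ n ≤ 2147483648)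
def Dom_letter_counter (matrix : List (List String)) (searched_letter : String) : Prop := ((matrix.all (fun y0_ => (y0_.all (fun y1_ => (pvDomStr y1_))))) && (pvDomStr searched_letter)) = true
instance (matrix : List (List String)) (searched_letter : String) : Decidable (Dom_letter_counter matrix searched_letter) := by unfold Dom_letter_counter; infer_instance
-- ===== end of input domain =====

-- B replaces A's whole-histogram dictionary with a single integer total (sum of per-row counts), mapping 0 to none; objective: simpler.

-- ===== PORT A =====
-- one iteration of A's inner loop body: setdefault-style 'if letter not in d: d[letter]=0' then 'd[letter] += 1'
def lcStep (d : PySem.Dict String Int) (letter : String) : PySem.Dict String Int :=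
  let d' := if d.contains letter then d else d.insert letter 0
  d'.insert letter (d'.getD letter 0 + 1)

def letter_counter (matrix : List (List String)) (searched_letter : String) : Option Int :=
  let all_letters := matrix.foldl (fun d row => row.foldl lcStep d) PySem.Dict.empty
  if all_letters.contains searched_letter then some (all_letters.getD searched_letter 0)
  else none

-- ===== PORT B =====
def letter_counter_alt (matrix : List (List String)) (searched_letter : String) : Option Int :=
  let total : Int := (matrix.map (fun row => (PySem.List.count row searched_letter : Int))).sum
  if total = 0 then none else some total

-- ===== PRECONDITION & SPEC =====
def Spec_letter_counter (matrix : List (List String)) (searched_letter : String) (out : Option Int) : Prop := out = letter_counter_alt matrix searched_letter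
instance (matrix : List (List String)) (searched_letter : String) (out : Option Int) : Decidable (Spec_letter_counter matrix searched_letter out) := by unfold Spec_letter_counter; infer_instance

-- ===== CLAIM (what is proved, stated in full; the proofs are below) =====
def Claim_equal_letter_counter : Prop := ∀ (matrix : List (List String)) (searched_letter : String), Dom_letter_counter matrix searched_letter → Spec_letter_counter matrix searched_letter (letter_counter matrix searched_letter)

-- ===== LEMMAS AND PROOFS =====

theorem lcStep_getD (d : PySem.Dict String Int) (x v : String) :
    (lcStep d x).getD v 0 = if v = x then d.getD v 0 + 1 else d.getD v 0 := by
  unfold lcStep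
  by_cases hvx : v = x
  · subst hvx
    by_cases h : d.contains v = true
    · simp [h]
    · simp only [Bool.not_eq_true] at h
      have h0 : d.getD v (0 : Int) = 0 := PySem.Dict.getD_of_not_contains d 0 h
      simp [h, h0]
  · by_cases h : d.contains x = true
    · simp [h, PySem.Dict.getD_insert, hvx]
    · simp only [Bool.not_eq_true] at h
      simp [h, PySem.Dict.getD_insert, hvx]

theorem lcStep_contains (d : PySem.Dict String Int) (x v : String) :
    (lcStep d x).contains v = (v == x || d.contains v) := by
  unfold lcStep
  by_cases h : d.contains x = true
  · simp [h, PySem.Dict.contains_insert]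
  · simp only [Bool.not_eq_true] at h
    simp [h, PySem.Dict.contains_insert]

theorem rowFold_getD (row : List String) (d : PySem.Dict String Int) (v : String) :
    (row.foldl lcStep d).getD v 0 = d.getD v 0 + row.count v := by
  induction row generalizing d with
  | nil => simp
  | cons x xs ih =>
    simp only [List.foldl_cons, ih, lcStep_getD, List.count_cons]
    by_cases hv : v = x
    · simp [hv]; ring
    · simp [hv, Ne.symm hv]

theorem rowFold_contains (row : List String) (d : PySem.Dict String Int) (v : String) :
    (row.foldl lcStep d).contains v = (d.contains v || decide (v ∈ row)) := by
  induction row generalizing d with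
  | nil => simp
  | cons x xs ih =>
    simp only [List.foldl_cons, ih, lcStep_contains, List.mem_cons]
    by_cases hv : v = x
    · simp [hv]
    · have hb : (v == x) = false := by simp [hv]
      simp [hb, hv]

theorem matFold_getD (matrix : List (List String)) (d : PySem.Dict String Int) (v : String) :
    (matrix.foldl (fun d row => row.foldl lcStep d) d).getD v 0
      = d.getD v 0 + (matrix.map (fun row => (row.count v : Int))).sum := by
  induction matrix generalizing d with
  | nil => simp
  | cons r rs ih => simp [ih, rowFold_getD]; ring

theorem matFold_contains (matrix : List (List String)) (d : PySem.Dict String Int) (v : String) :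
    (matrix.foldl (fun d row => row.foldl lcStep d) d).contains v
      = (d.contains v || decide (∃ r ∈ matrix, v ∈ r)) := by
  induction matrix generalizing d with
  | nil => simp
  | cons r rs ih =>
    simp only [List.foldl_cons, ih, rowFold_contains]
    by_cases hv : v ∈ r <;> simp [hv, Bool.or_comm]

theorem count_sum_pos_iff (matrix : List (List String)) (v : String) :
    (matrix.map (fun row => (row.count v : Int))).sum ≠ 0 ↔ ∃ r ∈ matrix, v ∈ r := by
  induction matrix with
  | nil => simp
  | cons r rs ih =>
    have h1 : (0 : Int) ≤ (rs.map (fun row => (row.count v : Int))).sum := by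
      apply List.sum_nonneg; intro x hx
      simp only [List.mem_map] at hx
      obtain ⟨row, _, rfl⟩ := hx; positivity
    simp only [List.map_cons, List.sum_cons, List.mem_cons]
    constructor
    · intro h
      by_cases hr : v ∈ r
      · exact ⟨r, Or.inl rfl, hr⟩
      · have : r.count v = 0 := List.count_eq_zero.mpr hr
        simp [this] at h
        obtain ⟨rr, hrr, hv⟩ := ih.mp h
        exact ⟨rr, Or.inr hrr, hv⟩
    · rintro ⟨rr, hrr | hrr, hv⟩
      · subst hrr
        have : 0 < rr.count v := List.count_pos_iff.mpr hv
        omega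
      · have := ih.mpr ⟨rr, hrr, hv⟩
        have h2 : (0 : Int) ≤ (rr.count v : Int) := by positivity
        have h3 : (0 : Int) ≤ (r.count v : Int) := by positivity
        omega

-- ===== VERDICT (by name: the statement is the Claim_ definition above) =====
theorem letter_counter_spec : Claim_equal_letter_counter := by
  intro matrix s _
  unfold Spec_letter_counter letter_counter letter_counter_alt
  simp only [matFold_getD, matFold_contains, PySem.Dict.getD_empty, PySem.Dict.contains_empty,
    Bool.false_or, zero_add]
  by_cases h : (matrix.map (fun row => ((row.count s : Nat) : Int))).sum = 0
  · simp [h, (not_iff_not.mpr (count_sum_pos_iff matrix s)).mp (not_not.mpr h)]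
  · simp [h, (count_sum_pos_iff matrix s).mp h]
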